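-- pv_equiv track=rewrite | github.com/Wenszel/agh-introduction-to-computer-science | set_07/t_15.py | dec_to_tri
-- ===== SOURCE A (Python) =====
-- def dec_to_tri(num):
--     output = 0
--     power = 0
--     while num > 0:
--         output += num % 3 * 10 ** power
--         power += 1
--         num //= 3
--     return output
-- ===== SOURCE B (Python) =====
-- def dec_to_tri(num):
--     if num <= 0:
--         return 0
--     return dec_to_tri(num // 3) * 10 + num % 3
-- ===== Notes on version B (the rewrite author's own statement) =====
-- stated objective: alternative
-- what changed: Replaces A's while loop with an explicit power-of-ten counter by a direct recursion on the quotient that builds the result most-significant-digit first (times ten plus digit).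
import Mathlib
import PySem

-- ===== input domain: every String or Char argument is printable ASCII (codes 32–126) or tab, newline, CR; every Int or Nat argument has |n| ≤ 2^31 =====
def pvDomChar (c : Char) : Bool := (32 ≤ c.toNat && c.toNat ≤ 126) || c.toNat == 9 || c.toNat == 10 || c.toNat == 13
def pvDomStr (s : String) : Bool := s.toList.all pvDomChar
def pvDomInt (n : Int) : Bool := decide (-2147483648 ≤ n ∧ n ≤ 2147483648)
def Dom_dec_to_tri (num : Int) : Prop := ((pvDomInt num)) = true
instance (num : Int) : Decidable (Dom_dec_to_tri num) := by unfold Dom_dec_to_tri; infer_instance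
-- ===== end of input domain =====

-- B replaces A's while loop with an explicit power-of-ten counter by a direct recursion on the quotient, most-significant digit placed by the outer call; objective: alternative decomposition, same cost.


-- ===== PORT A =====
-- while num > 0: output += num % 3 * 10 ** power; power += 1; num //= 3
-- power is always ≥ 0, so 10 ** power is ported as 10 ^ power.toNat (exact here).
def dec_to_tri_go (num output power : Int) : Int :=
  if h : num > 0 then
    dec_to_tri_go (PySem.Int.floordiv num 3) (output + PySem.Int.mod num 3 * 10 ^ power.toNat) (power + 1)
  else output
termination_by num.toNat
decreasing_by
  rw [PySem.Int.floordiv_eq_ediv_of_pos (by omega : (0:Int) < 3)]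
  omega

def dec_to_tri (num : Int) : Int := dec_to_tri_go num 0 0

-- ===== PORT B =====
def dec_to_tri_alt (num : Int) : Int :=
  if h : num ≤ 0 then 0
  else dec_to_tri_alt (PySem.Int.floordiv num 3) * 10 + PySem.Int.mod num 3
termination_by num.toNat
decreasing_by
  rw [PySem.Int.floordiv_eq_ediv_of_pos (by omega : (0:Int) < 3)]
  omega

-- ===== PRECONDITION & SPEC =====
def Spec_dec_to_tri (num : Int) (out : Int) : Prop := out = dec_to_tri_alt num
instance (num : Int) (out : Int) : Decidable (Spec_dec_to_tri num out) := by unfold Spec_dec_to_tri; infer_instance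

-- ===== CLAIM (what is proved, stated in full; the proofs are below) =====
def Claim_equal_dec_to_tri : Prop := ∀ (num : Int), Dom_dec_to_tri num → Spec_dec_to_tri num (dec_to_tri num)

-- ===== LEMMAS AND PROOFS =====
theorem dec_to_tri_go_eq (k : Nat) : ∀ (num output power : Int), num.toNat ≤ k → 0 ≤ power →
    dec_to_tri_go num output power = output + dec_to_tri_alt num * 10 ^ power.toNat := by
  induction k with
  | zero =>
    intro num output power hk hp
    rw [dec_to_tri_go, dec_to_tri_alt]
    have hnum : ¬ num > 0 := by omega
    have hle : num ≤ 0 := by omega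
    simp [hnum, hle]
  | succ k ih =>
    intro num output power hk hp
    rw [dec_to_tri_go, dec_to_tri_alt]
    by_cases h : num > 0
    · have h3 : PySem.Int.floordiv num 3 = num / 3 :=
        PySem.Int.floordiv_eq_ediv_of_pos (by omega)
      have hrec : (num / 3).toNat ≤ k := by omega
      have hnle : ¬ num ≤ 0 := by omega
      rw [dif_pos h, dif_neg hnle, h3,
        ih (num / 3) (output + PySem.Int.mod num 3 * 10 ^ power.toNat) (power + 1) hrec (by omega)]
      have hpt : (power + 1).toNat = power.toNat + 1 := by omega
      rw [hpt]
      ring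
    · have hle : num ≤ 0 := by omega
      rw [dif_neg h, dif_pos hle]
      simp

-- ===== VERDICT (by name: the statement is the Claim_ definition above) =====
theorem dec_to_tri_spec : Claim_equal_dec_to_tri := by
  intro num _
  unfold Spec_dec_to_tri dec_to_tri
  have := dec_to_tri_go_eq num.toNat num 0 0 le_rfl le_rfl
  simpa using this
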